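-- pv_equiv track=rewrite | github.com/stocktons/advent-of-code-2023 | day-02/part-2.py | find_highest_dice_in_game
-- ===== SOURCE A (Python) =====
-- def strip_punctuation(color: str):
--     """
--     Strip trailing ';' or ',' from colors.
--
--     >>> strip_punctuation("green;")
--     'green'
--
--     >>> strip_punctuation("red")
--     'red'
--     """
--
--     if color.endswith(",") or color.endswith(";"):
--         return color[:-1]
--
--     return color
--
-- def find_highest_dice_in_game(game_data):
--     """
--     Loops over a single game and finds the greatest number of red, blue, and
--     green dice respectively. Returns a dictionary with these values.
--
--     >>> find_highest_dice_in_game(["Game", "1:", "3", "blue,", "4", "red;", "1", "red,", "2", "green,", "6", "blue;", "2", "green"]) # noqa: E501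
--     {'red': 4, 'blue': 6, 'green': 2}
--     """
--
--     highest_dice_in_game = {"red": 0, "blue": 0, "green": 0}
--
--     # loop starting at index 2, only landing on even indexes (ints)
--     for i in range(2, len(game_data), 2):
--         die_color_raw = game_data[i + 1]
--         die_color = strip_punctuation(die_color_raw)
--         die_count = int(game_data[i])
--
--         if die_count > highest_dice_in_game[die_color]:
--             highest_dice_in_game[die_color] = die_count
--
--     return highest_dice_in_game
-- ===== SOURCE B (Python) =====
-- def find_highest_dice_in_game(game_data):
--     # Group every count by its color, then reduce each group with max.
--     it = iter(game_data[2:])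
--     groups = {}
--     for count_s, color_raw in zip(it, it):
--         color = color_raw[:-1] if color_raw.endswith((",", ";")) else color_raw
--         groups.setdefault(color, []).append(int(count_s))
--     best = {"red": 0, "blue": 0, "green": 0}
--     for color in best:
--         if color in groups:
--             best[color] = max(best[color], max(groups[color]))
--     return best
-- ===== Notes on version B (the rewrite author's own statement) =====
-- stated objective: alternative
-- what changed: Replaces A's index-stepping loop that maintains a running maximum per color with a pair-up of the token stream (zip of one iterator with itself), a group-by-color table of all counts, and a separate per-color max reduction over the seeded result dict.
import Mathlib
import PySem

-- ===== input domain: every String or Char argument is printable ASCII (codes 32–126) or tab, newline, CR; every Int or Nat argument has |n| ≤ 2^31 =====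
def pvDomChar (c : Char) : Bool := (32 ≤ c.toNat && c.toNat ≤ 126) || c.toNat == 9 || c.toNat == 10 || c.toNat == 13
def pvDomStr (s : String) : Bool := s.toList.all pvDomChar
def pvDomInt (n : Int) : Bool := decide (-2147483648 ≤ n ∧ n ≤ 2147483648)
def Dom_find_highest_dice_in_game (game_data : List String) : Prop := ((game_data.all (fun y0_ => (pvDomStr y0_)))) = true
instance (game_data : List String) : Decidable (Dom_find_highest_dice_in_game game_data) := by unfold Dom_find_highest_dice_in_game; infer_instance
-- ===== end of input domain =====

-- B replaces A's index-stepping running-max loop by pair-up → group-by-color → per-color max reduction (alternative decomposition, same cost).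


-- ===== PORT A =====
def strip_punctuation (color : String) : String :=
  if PySem.Str.endswith color "," || PySem.Str.endswith color ";" then
    PySem.Str.slice color none (some (-1))
  else color

def find_highest_dice_in_game (game_data : List String) : List (String × Int) :=
  (List.foldl
    (fun (d : PySem.Dict String Int) (i : Int) =>
      let die_color_raw := PySem.List.pyGetD game_data (i + 1) ""
      let die_color := strip_punctuation die_color_raw
      let die_count := (PySem.Int.ofStr? (PySem.List.pyGetD game_data i "")).getD 0
      if die_count > d.getD die_color 0 then d.insert die_color die_count else d)
    (PySem.Dict.ofList [("red", 0), ("blue", 0), ("green", 0)])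
    (PySem.List.pyRange 2 (PySem.List.len game_data) 2)).items

-- ===== PORT B =====
-- zip(it, it) on one iterator pairs up consecutive elements, dropping an unmatched last one (exact)
def pvPairUp {α : Type} : List α → List (α × α)
  | a :: b :: rest => (a, b) :: pvPairUp rest
  | _ => []

def find_highest_dice_in_game_alt (game_data : List String) : List (String × Int) :=
  let pairs := pvPairUp (PySem.List.slice game_data (some 2) none)
  let groups := List.foldl
    (fun (g : PySem.Dict String (List Int)) (p : String × String) =>
      let color := if PySem.Str.endswith p.2 "," || PySem.Str.endswith p.2 ";" then
          PySem.Str.slice p.2 none (some (-1)) else p.2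
      g.modify color [] (fun l => l ++ [(PySem.Int.ofStr? p.1).getD 0]))
    PySem.Dict.empty pairs
  (List.foldl
    (fun (b : PySem.Dict String Int) (c : String) =>
      match groups.get? c with
      | some l => b.insert c (max (b.getD c 0) ((PySem.List.max? l (fun x => x)).getD 0))
      | none => b)
    (PySem.Dict.ofList [("red", 0), ("blue", 0), ("green", 0)])
    ["red", "blue", "green"]).items

-- ===== PRECONDITION & SPEC =====
-- Pre_ excludes exactly the inputs where A raises: an odd tail after the two header
-- tokens (IndexError on game_data[i+1]), a count token int() rejects (ValueError), and a
-- color token other than red/blue/green with at most one trailing ','/';' (KeyError).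
def Pre_find_highest_dice_in_game (game_data : List String) : Prop :=
  (game_data.drop 2).length % 2 = 0 ∧
  ∀ k < (game_data.drop 2).length, 2 * k + 1 < (game_data.drop 2).length →
    (PySem.Int.ofStr? ((game_data.drop 2).getD (2 * k) "")).isSome = true ∧
    (game_data.drop 2).getD (2 * k + 1) ""
      ∈ (["red", "blue", "green", "red,", "red;", "blue,", "blue;", "green,", "green;"] : List String)
instance (game_data : List String) : Decidable (Pre_find_highest_dice_in_game game_data) := by
  unfold Pre_find_highest_dice_in_game; infer_instance

def pvWitness_find_highest_dice_in_game : List String :=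
  ["Game", "1:", "3", "blue,", "4", "red;", "1", "red,", "2", "green,", "6", "blue;", "2", "green"]

def Spec_find_highest_dice_in_game (game_data : List String) (out : List (String × Int)) : Prop := out = find_highest_dice_in_game_alt game_data
instance (game_data : List String) (out : List (String × Int)) : Decidable (Spec_find_highest_dice_in_game game_data out) := by unfold Spec_find_highest_dice_in_game; infer_instance

-- ===== CLAIM (what is proved, stated in full; the proofs are below) =====
def Claim_equal_find_highest_dice_in_game : Prop := ∀ (game_data : List String), Dom_find_highest_dice_in_game game_data → Pre_find_highest_dice_in_game game_data → Spec_find_highest_dice_in_game game_data (find_highest_dice_in_game game_data)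

-- ===== LEMMAS AND PROOFS =====
def pvCnt (s : String) : Int := (PySem.Int.ofStr? s).getD 0
def pvCol (s : String) : String := strip_punctuation s
def pvStepA (d : PySem.Dict String Int) (p : String × String) : PySem.Dict String Int :=
  if pvCnt p.1 > d.getD (pvCol p.2) 0 then d.insert (pvCol p.2) (pvCnt p.1) else d
def pvGroups (P : List (String × String)) : PySem.Dict String (List Int) :=
  List.foldl (fun g p => g.modify (pvCol p.2) [] (fun l => l ++ [pvCnt p.1])) PySem.Dict.empty P
def pvL (P : List (String × String)) (c : String) : List Int :=
  (P.filter (fun p => pvCol p.2 == c)).map (fun p => pvCnt p.1)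
def pvW (g : PySem.Dict String (List Int)) (c : String) (v : Int) : Int :=
  match g.get? c with
  | some l => max v ((PySem.List.max? l (fun x => x)).getD 0)
  | none => v
def pvAR (P : List (String × String)) (c : String) : Int :=
  P.foldl (fun a p => if pvCol p.2 = c then max a (pvCnt p.1) else a) 0

lemma pyRange_two_cons (a b : Int) (h : a < b) :
    PySem.List.pyRange a b 2 = a :: PySem.List.pyRange (a + 2) b 2 := by
  rw [PySem.List.pyRange_of_pos a b (by norm_num : (0:Int) < 2),
      PySem.List.pyRange_of_pos (a+2) b (by norm_num : (0:Int) < 2)]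
  by_cases h2 : a + 2 < b
  · have hc : ((b - a + 2 - 1) / 2).toNat = ((b - (a + 2) + 2 - 1) / 2).toNat + 1 := by
      have he : b - a + 2 - 1 = (b - (a + 2) + 2 - 1) + 1 * 2 := by ring
      rw [he, Int.add_mul_ediv_right _ _ (by norm_num : (2:Int) ≠ 0)]
      have h0 : (0:Int) ≤ (b - (a + 2) + 2 - 1) / 2 := Int.ediv_nonneg (by omega) (by norm_num)
      omega
    simp only [if_pos h, if_pos h2, hc, List.range_succ_eq_map, List.map_cons, List.map_map]
    congr 1
    · simp
    · apply List.map_congr_left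
      intro k _
      simp
      ring
  · have hc : ((b - a + 2 - 1) / 2).toNat = 1 := by omega
    simp [if_pos h, if_neg h2, hc]

lemma pyRange_two_nil (a b : Int) (h : b ≤ a) : PySem.List.pyRange a b 2 = [] := by
  rw [PySem.List.pyRange_of_pos a b (by norm_num : (0:Int) < 2)]
  simp [show ¬ a < b by omega]

lemma map_pairs (gd : List String) :
    ∀ (k j : Nat), gd.length - j ≤ k → (gd.drop j).length % 2 = 0 →
    (PySem.List.pyRange (j : Int) (gd.length : Int) 2).map
        (fun i => (PySem.List.pyGetD gd i "", PySem.List.pyGetD gd (i + 1) "")) =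
      pvPairUp (gd.drop j) := by
  intro k
  induction k with
  | zero =>
    intro j hk _
    have hj : gd.length ≤ j := by omega
    rw [pyRange_two_nil _ _ (by exact_mod_cast Nat.cast_le.mpr hj),
        List.drop_eq_nil_of_le hj]
    rfl
  | succ k ih =>
    intro j hk hpar
    by_cases hj : gd.length ≤ j
    · rw [pyRange_two_nil _ _ (by exact_mod_cast Nat.cast_le.mpr hj),
          List.drop_eq_nil_of_le hj]
      rfl
    · have hlt : j < gd.length := by omega
      have hlen : (gd.drop j).length = gd.length - j := List.length_drop
      have h2 : 2 ≤ (gd.drop j).length := by omega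
      rcases hd : gd.drop j with _ | ⟨a, t⟩
      · rw [hd] at h2; simp at h2
      rcases ht : t with _ | ⟨b, r⟩
      · rw [hd, ht] at h2; simp at h2
      subst ht
      rw [pyRange_two_cons _ _ (by exact_mod_cast Nat.cast_lt.mpr hlt)]
      simp only [List.map_cons]
      have hga : gd[j]? = some a := by
        have := List.getElem?_drop (xs := gd) (i := j) (j := 0)
        rw [hd] at this; simpa using this.symm
      have hgb : gd[j + 1]? = some b := by
        have := List.getElem?_drop (xs := gd) (i := j) (j := 1)
        rw [hd] at this; simpa using this.symm
      have hr : gd.drop (j + 2) = r := by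
        have h22 : gd.drop (j + 2) = (gd.drop j).drop 2 := by
          rw [List.drop_drop]
        rw [h22, hd]
        rfl
      have hcast2 : (j : Int) + 2 = ((j + 2 : Nat) : Int) := by push_cast; ring
      have hcast1 : (j : Int) + 1 = ((j + 1 : Nat) : Int) := by push_cast; ring
      rw [hcast2, ih (j + 2) (by omega) (by rw [hr]; rw [hd] at hpar; simp at hpar; omega), hr]
      simp only [pvPairUp]
      congr 1
      rw [hcast1, PySem.List.pyGetD_natCast, PySem.List.pyGetD_natCast,
          List.getD_eq_getElem?_getD, List.getD_eq_getElem?_getD, hga, hgb]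
      rfl

lemma getD_stepA_fold (P : List (String × String)) :
    ∀ (d : PySem.Dict String Int) (c : String),
    (P.foldl pvStepA d).getD c 0
      = P.foldl (fun a p => if pvCol p.2 = c then max a (pvCnt p.1) else a) (d.getD c 0) := by
  induction P with
  | nil => intro d c; rfl
  | cons p P ih =>
    intro d c
    simp only [List.foldl_cons]
    rw [ih]
    congr 1
    unfold pvStepA
    by_cases hc : pvCol p.2 = c
    · rw [hc, if_pos rfl]
      by_cases hgt : pvCnt p.1 > d.getD c 0
      · rw [if_pos hgt, PySem.Dict.getD_insert_self]; omega
      · rw [if_neg hgt]; omega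
    · rw [if_neg hc]
      by_cases hgt : pvCnt p.1 > d.getD (pvCol p.2) 0
      · rw [if_pos hgt]; exact PySem.Dict.getD_insert_of_ne d _ _ (Ne.symm hc)
      · rw [if_neg hgt]

lemma keys_stepA_fold (P : List (String × String)) :
    ∀ (d : PySem.Dict String Int), (∀ p ∈ P, pvCol p.2 ∈ d.keys) →
    (P.foldl pvStepA d).keys = d.keys := by
  induction P with
  | nil => intro d _; rfl
  | cons p P ih =>
    intro d h
    have hk : (pvStepA d p).keys = d.keys := by
      unfold pvStepA
      split
      · exact PySem.Dict.keys_insert_of_contains d _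
          ((PySem.Dict.contains_iff_mem_keys d _).mpr (h p (by simp)))
      · rfl
    simp only [List.foldl_cons]
    rw [ih _ (by intro q hq; rw [hk]; exact h q (by simp [hq])), hk]

lemma slice2_eq (gd : List String) : PySem.List.slice gd (some 2) none = gd.drop 2 := by
  rw [PySem.List.slice_from gd (by norm_num : (0:Int) ≤ 2)]
  rfl

lemma A_eq (gd : List String) (hpar : (gd.drop 2).length % 2 = 0)
    (hcols : ∀ p ∈ pvPairUp (gd.drop 2), pvCol p.2 ∈ (["red", "blue", "green"] : List String)) :
    find_highest_dice_in_game gd =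
      [("red", pvAR (pvPairUp (gd.drop 2)) "red"),
       ("blue", pvAR (pvPairUp (gd.drop 2)) "blue"),
       ("green", pvAR (pvPairUp (gd.drop 2)) "green")] := by
  have hbody : (fun (d : PySem.Dict String Int) (i : Int) =>
      let die_color_raw := PySem.List.pyGetD gd (i + 1) ""
      let die_color := strip_punctuation die_color_raw
      let die_count := (PySem.Int.ofStr? (PySem.List.pyGetD gd i "")).getD 0
      if die_count > d.getD die_color 0 then d.insert die_color die_count else d)
      = fun d i => pvStepA d ((fun i => (PySem.List.pyGetD gd i "", PySem.List.pyGetD gd (i + 1) "")) i) := rfl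
  have hmp := map_pairs gd gd.length 2 (by omega) hpar
  simp only [Nat.cast_ofNat] at hmp
  unfold find_highest_dice_in_game
  rw [hbody, ← List.foldl_map, PySem.List.len_eq, hmp]
  set P := pvPairUp (gd.drop 2) with hP
  set d0 : PySem.Dict String Int := PySem.Dict.ofList [("red", 0), ("blue", 0), ("green", 0)] with hd0
  have hkeys0 : d0.keys = ["red", "blue", "green"] := by rw [hd0]; rfl
  have hkeys : (P.foldl pvStepA d0).keys = ["red", "blue", "green"] := by
    rw [keys_stepA_fold P d0 (by intro p hp; rw [hkeys0]; exact hcols p hp), hkeys0]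
  have hnd : (P.foldl pvStepA d0).keys.Nodup := by rw [hkeys]; decide
  rw [PySem.Dict.items_eq_map_keys _ hnd 0, hkeys]
  simp only [List.map_cons, List.map_nil]
  rw [getD_stepA_fold P d0 "red", getD_stepA_fold P d0 "blue", getD_stepA_fold P d0 "green"]
  rfl

lemma groups_getD (P : List (String × String)) (c : String) :
    (pvGroups P).getD c [] = pvL P c := by
  unfold pvGroups pvL
  have hfold : List.foldl (fun g p => g.modify (pvCol p.2) [] (fun l => l ++ [pvCnt p.1]))
        PySem.Dict.empty P
      = List.foldl (fun g (q : String × Int) => g.modify q.1 [] (fun l => l ++ [q.2]))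
        PySem.Dict.empty (P.map (fun p => (pvCol p.2, pvCnt p.1))) :=
    (List.foldl_map (f := fun p : String × String => (pvCol p.2, pvCnt p.1))
      (g := fun (g : PySem.Dict String (List Int)) (q : String × Int) =>
        g.modify q.1 [] (fun l => l ++ [q.2]))).symm
  rw [hfold, PySem.Dict.getD_foldl_modify_append, PySem.Dict.getD_empty]
  rw [List.filter_map, List.map_map]
  congr 1

lemma groups_keys (P : List (String × String)) :
    (pvGroups P).keys = PySem.Set.ofList (P.map (fun p => pvCol p.2)) := by
  unfold pvGroups
  rw [PySem.Dict.keys_foldl_modify_key P (fun p => pvCol p.2) []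
        (fun _ p => fun l => l ++ [pvCnt p.1]) PySem.Dict.empty,
      PySem.Dict.keys_empty, PySem.Set.update_nil_left]

lemma bestfold (g : PySem.Dict String (List Int)) (r bl gr : Int) :
    (List.foldl
      (fun (b : PySem.Dict String Int) (c : String) =>
        match g.get? c with
        | some l => b.insert c (max (b.getD c 0) ((PySem.List.max? l (fun x => x)).getD 0))
        | none => b)
      (PySem.Dict.ofList [("red", r), ("blue", bl), ("green", gr)])
      ["red", "blue", "green"]).items
    = [("red", pvW g "red" r), ("blue", pvW g "blue" bl), ("green", pvW g "green" gr)] := by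
  have hof : PySem.Dict.ofList [("red", r), ("blue", bl), ("green", gr)]
      = PySem.Dict.mk [("red", r), ("blue", bl), ("green", gr)] := by
    simp [PySem.Dict.ofList, PySem.Dict.update, PySem.Dict.empty, PySem.Dict.insert,
      PySem.Dict.contains]
  rw [hof]
  rcases hr : g.get? "red" with _ | lr <;> rcases hbu : g.get? "blue" with _ | lb <;>
    rcases hgr : g.get? "green" with _ | lg <;>
      (simp only [List.foldl_cons, List.foldl_nil, pvW, hr, hbu, hgr] <;>
       simp [PySem.Dict.insert, PySem.Dict.contains, PySem.Dict.getD, PySem.Dict.get?])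

lemma B_eq (gd : List String) :
    find_highest_dice_in_game_alt gd =
      [("red", pvW (pvGroups (pvPairUp (gd.drop 2))) "red" 0),
       ("blue", pvW (pvGroups (pvPairUp (gd.drop 2))) "blue" 0),
       ("green", pvW (pvGroups (pvPairUp (gd.drop 2))) "green" 0)] := by
  unfold find_highest_dice_in_game_alt
  rw [slice2_eq]
  exact bestfold (pvGroups (pvPairUp (gd.drop 2))) 0 0 0

lemma AR_foldmax (P : List (String × String)) (c : String) :
    pvAR P c = (pvL P c).foldl (fun a x => max a x) 0 := by
  unfold pvAR pvL
  rw [PySem.List.foldl_ite_eq_foldl_filter (fun p : String × String => pvCol p.2 = c)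
        (fun a p => max a (pvCnt p.1)) P 0,
      List.foldl_map]
  congr 1

lemma AR_eq_W (P : List (String × String)) (c : String) :
    pvAR P c = pvW (pvGroups P) c 0 := by
  by_cases hex : ∃ p ∈ P, pvCol p.2 = c
  · have hmem : c ∈ (pvGroups P).keys := by
      rw [groups_keys]
      rw [PySem.Set.mem_ofList]
      obtain ⟨p, hp, hpc⟩ := hex
      exact List.mem_map.mpr ⟨p, hp, hpc⟩
    obtain ⟨l, hl⟩ : ∃ l, (pvGroups P).get? c = some l := by
      cases h : (pvGroups P).get? c with
      | none => exact absurd ((PySem.Dict.get?_eq_none_iff_not_mem_keys _ _).mp h) (by simp [hmem])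
      | some l => exact ⟨l, rfl⟩
    have hLl : l = pvL P c := by
      have hg := groups_getD P c
      rw [PySem.Dict.getD_eq_get?_getD, hl] at hg
      simpa using hg
    have hne : pvL P c ≠ [] := by
      unfold pvL
      obtain ⟨p, hp, hpc⟩ := hex
      simp only [ne_eq, List.map_eq_nil_iff, List.filter_eq_nil_iff, not_forall]
      exact ⟨p, hp, by simp [hpc]⟩
    unfold pvW
    rw [hl]
    show pvAR P c = max 0 ((PySem.List.max? l (fun x => x)).getD 0)
    rcases hL : pvL P c with _ | ⟨x, t⟩
    · exact absurd hL hne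
    · rw [hLl, hL, PySem.List.max?_id_cons]
      simp only [Option.getD_some]
      rw [AR_foldmax P c, hL, List.foldl_cons]
      exact @List.foldl_assoc _ max ⟨max_assoc⟩ t 0 x
  · have hnm : c ∉ (pvGroups P).keys := by
      rw [groups_keys, PySem.Set.mem_ofList]
      intro hc
      obtain ⟨p, hp, hpc⟩ := List.mem_map.mp hc
      exact hex ⟨p, hp, hpc⟩
    have hnone : (pvGroups P).get? c = none :=
      (PySem.Dict.get?_eq_none_iff_not_mem_keys _ _).mpr hnm
    unfold pvW
    rw [hnone]
    unfold pvAR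
    rw [PySem.List.foldl_congr_mem P _ (fun a _ => a) 0
        (by intro a p hp; rw [if_neg (fun h => hex ⟨p, hp, h⟩)]),
      PySem.List.foldl_ignore]

lemma pvCol_mem9 (s : String)
    (h : s ∈ (["red", "blue", "green", "red,", "red;", "blue,", "blue;", "green,", "green;"] : List String)) :
    pvCol s ∈ (["red", "blue", "green"] : List String) := by
  simp only [List.mem_cons, List.not_mem_nil, or_false] at h
  rcases h with rfl | rfl | rfl | rfl | rfl | rfl | rfl | rfl | rfl <;> decide

lemma mem_pvPairUp (t : List String) :
    ∀ p ∈ pvPairUp t, ∃ k, 2 * k + 1 < t.length ∧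
      p.1 = t.getD (2 * k) "" ∧ p.2 = t.getD (2 * k + 1) "" := by
  induction t using pvPairUp.induct (α := String) with
  | case1 a b r ih =>
    intro p hp
    simp only [pvPairUp, List.mem_cons] at hp
    rcases hp with rfl | hp
    · exact ⟨0, by simp [List.length_cons], rfl, rfl⟩
    · obtain ⟨k, hk, h1, h2⟩ := ih p hp
      refine ⟨k + 1, by simp [List.length_cons]; omega, ?_, ?_⟩
      · rw [show 2 * (k + 1) = (2 * k + 1) + 1 by ring, List.getD_cons_succ, List.getD_cons_succ]
        exact h1
      · rw [show 2 * (k + 1) + 1 = (2 * k + 1 + 1) + 1 by ring, List.getD_cons_succ,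
          List.getD_cons_succ]
        exact h2
  | case2 t h1 =>
    intro p hp
    cases t with
    | nil => simp [pvPairUp] at hp
    | cons a t' =>
      cases t' with
      | nil => simp [pvPairUp] at hp
      | cons b r => exact absurd rfl (h1 a b r)

-- ===== VERDICT (by name: the statement is the Claim_ definition above) =====
theorem find_highest_dice_in_game_spec : Claim_equal_find_highest_dice_in_game := by
  intro gd _ hPre
  obtain ⟨hpar, hall⟩ := hPre
  have hall' : ∀ p ∈ pvPairUp (gd.drop 2),
      p.2 ∈ (["red", "blue", "green", "red,", "red;", "blue,", "blue;", "green,", "green;"] : List String) := by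
    intro p hp
    obtain ⟨k, hk, _, h2⟩ := mem_pvPairUp (gd.drop 2) p hp
    rw [h2]
    exact (hall k (by omega) hk).2
  unfold Spec_find_highest_dice_in_game
  rw [A_eq gd hpar (fun p hp => pvCol_mem9 p.2 (hall' p hp)), B_eq gd]
  rw [AR_eq_W, AR_eq_W, AR_eq_W]
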